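-- pv_equiv track=rewrite | github.com/lv336python/core | tasks/chapter7.py | task_178_e
-- ===== SOURCE A (Python) =====
-- def task_178_e(numbers):
--     '''
--     Function returns lenth of list of numbers a[k],
--     in list a[1],......,a[n] where 2^k < a[k] < k!.
--     '''
--     from math import factorial
--     pos_n = 0
--     list_a = []
--     for a_k in numbers:
--         pos_n += 1
--         if 2**pos_n < a_k < factorial(pos_n):
--             list_a.append(a_k)
--     return len(list_a)
-- ===== SOURCE B (Python) =====
-- def task_178_e(numbers):
--     # Staged: precompute both threshold tables once, then count over a zip.
--     n = len(numbers)
--     pows = []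
--     p = 1
--     for _ in range(n):
--         p += p
--         pows.append(p)
--     facs = []
--     f = 1
--     for k in range(1, n + 1):
--         f *= k
--         facs.append(f)
--     return sum(1 for p, a, f in zip(pows, numbers, facs) if p < a < f)
-- ===== Notes on version B (the rewrite author's own statement) =====
-- stated objective: alternative
-- what changed: Instead of recomputing 2**pos_n and math.factorial(pos_n) from scratch for every element and accumulating a list, B precomputes the two threshold tables (powers of two and factorials) in two scans and then counts matches in a single zip comprehension; it saves multiplications but trades memory for the stored tables.
import Mathlib
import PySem

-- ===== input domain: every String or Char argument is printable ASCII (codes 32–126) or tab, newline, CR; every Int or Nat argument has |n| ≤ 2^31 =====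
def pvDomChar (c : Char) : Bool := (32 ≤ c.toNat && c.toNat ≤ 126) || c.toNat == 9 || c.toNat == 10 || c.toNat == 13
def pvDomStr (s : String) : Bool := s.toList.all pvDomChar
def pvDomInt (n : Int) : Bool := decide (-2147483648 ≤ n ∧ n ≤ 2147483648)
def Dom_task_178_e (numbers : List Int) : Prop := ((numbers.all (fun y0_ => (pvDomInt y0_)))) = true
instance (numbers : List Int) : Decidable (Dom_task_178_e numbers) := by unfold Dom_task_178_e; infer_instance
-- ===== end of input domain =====

-- B precomputes the powers-of-two and factorial threshold tables in two scans and counts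
-- matches over a zip, instead of A's per-element 2**pos_n / factorial(pos_n) recomputation.


-- ===== PORT A =====
-- A: pos_n counts the 1-based position; recomputes 2**pos_n and factorial(pos_n) each
-- step, appends matching a_k to list_a, returns len(list_a).
def task_178_e_go (rest : List Int) (k : Nat) (list_a : List Int) : List Int :=
  match rest with
  | [] => list_a
  | a_k :: t =>
      task_178_e_go t (k + 1)
        (if (2 : Int) ^ (k + 1) < a_k ∧ a_k < (Nat.factorial (k + 1) : Int)
         then list_a ++ [a_k] else list_a)

def task_178_e (numbers : List Int) : Int :=
  ((task_178_e_go numbers 0 []).length : Int)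

-- ===== PORT B =====
-- B stage 1: the table [2^1, …, 2^n], built by doubling (p += p; append).
def task_178_e_pows (n : Nat) (p : Int) : List Int :=
  match n with
  | 0 => []
  | m + 1 => (p + p) :: task_178_e_pows m (p + p)

-- B stage 2: the table [1!, …, n!], built by running product (f *= k; append).
def task_178_e_facs (n : Nat) (k : Nat) (f : Int) : List Int :=
  match n with
  | 0 => []
  | m + 1 => (f * (k : Int)) :: task_178_e_facs m (k + 1) (f * (k : Int))

-- B stage 3: count matches over the zip of the three lists.
def task_178_e_alt (numbers : List Int) : Int :=
  let n := numbers.length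
  let pows := task_178_e_pows n 1
  let facs := task_178_e_facs n 1 1
  (((pows.zip (numbers.zip facs)).countP
      (fun paf => decide (paf.1 < paf.2.1 ∧ paf.2.1 < paf.2.2)) : Nat) : Int)

-- ===== PRECONDITION & SPEC =====
def Spec_task_178_e (numbers : List Int) (out : Int) : Prop := out = task_178_e_alt numbers
instance (numbers : List Int) (out : Int) : Decidable (Spec_task_178_e numbers out) := by unfold Spec_task_178_e; infer_instance

-- ===== CLAIM (what is proved, stated in full; the proofs are below) =====
def Claim_equal_task_178_e : Prop := ∀ (numbers : List Int), Dom_task_178_e numbers → Spec_task_178_e numbers (task_178_e numbers)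

-- ===== LEMMAS AND PROOFS =====
-- Loop invariant: A's accumulated-list length, started at position k with accumulator acc,
-- is acc.length plus B's zip-count with the tables started at 2^k and k!.
theorem task_178_e_key (rest : List Int) :
    ∀ (k : Nat) (acc : List Int),
      (task_178_e_go rest k acc).length
        = acc.length
          + ((task_178_e_pows rest.length ((2 : Int) ^ k)).zip
              (rest.zip (task_178_e_facs rest.length (k + 1) (Nat.factorial k)))).countP
              (fun paf => decide (paf.1 < paf.2.1 ∧ paf.2.1 < paf.2.2)) := by
  induction rest with
  | nil => intro k acc; simp [task_178_e_go, task_178_e_pows, task_178_e_facs]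
  | cons a t ih =>
      intro k acc
      have hp : (2 : Int) ^ k + (2 : Int) ^ k = 2 ^ (k + 1) := by ring
      have hf : ((Nat.factorial k : Int)) * ((k : Nat) + 1 : Nat) = (Nat.factorial (k + 1) : Int) := by
        push_cast [Nat.factorial_succ]; ring
      simp only [task_178_e_go, task_178_e_pows, task_178_e_facs, List.length_cons, hp, hf,
        List.zip_cons_cons, List.countP_cons]
      by_cases h : (2 : Int) ^ (k + 1) < a ∧ a < (Nat.factorial (k + 1) : Int)
      · rw [if_pos h, ih (k + 1) (acc ++ [a])]
        simp [h]
        omega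
      · simp only [if_neg h, ih (k + 1) acc]
        have : ¬ ((2 : Int) ^ (k + 1) < a ∧ a < (Nat.factorial (k + 1) : Int)) := h
        simp [this]

-- ===== VERDICT (by name: the statement is the Claim_ definition above) =====
theorem task_178_e_spec : Claim_equal_task_178_e := by
  intro numbers _
  unfold Spec_task_178_e task_178_e task_178_e_alt
  have := task_178_e_key numbers 0 []
  simp only [List.length_nil, Nat.zero_add, pow_zero, Nat.factorial_zero, Nat.cast_one] at this
  rw [this]
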